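-- pv_equiv track=rewrite | github.com/lichengunc/refer-parser2 | chunk_sents.py | extract_chunk
-- ===== SOURCE A (Python) =====
-- def extract_chunk(senna):
-- 	"""
-- 	senna = {chunk, pos, srl, syntax_tree, verbs, words, ner}
-- 	where chunk = [(the, B-NP), (lady, E-NP), ...], there are B, I, E, S, O prefix in total.
-- 	We extract the chunk in to [(phrase, phrase_type)], e.g.,
-- 	[('the lady', 'NP'), ('with', 'PP'), 'the blue shirt', 'NP']
--
-- 	Besides, we specifically deal with such case:
-- 	sent = 'boy', senna's chunk = [('boy', 'O')], senna's pos = [('boy', 'NN')]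
-- 	We also consider this single word to be NP
-- 	"""
-- 	raw_chunk = senna['chunk']
-- 	chunk = []
-- 	phrase, pix = '', 0
-- 	for c in raw_chunk:
-- 		if pix > 0:
-- 			phrase += ' '
-- 		phrase += c[0]
-- 		pix += 1
-- 		if 'E-' in c[1] or 'S-' in c[1]:
-- 			ptype = c[1][2:]
-- 			chunk += [(phrase, ptype)]
-- 			phrase, pix = '', 0
-- 		if c[1] == 'O':
-- 			if len(raw_chunk) == 1:
-- 				if senna['pos'][0][1] == 'NN':  # when sentence = 'boy', senna ouputs 'O' but we take it as 'NP'
-- 					chunk += [(phrase, 'NP')]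
-- 				else:
-- 					chunk += [(phrase, 'O')]
-- 			else:
-- 				chunk += [(phrase, 'O')]
-- 			phrase, pix = '', 0
-- 	# in case the last phrase has no "-E" to finish
-- 	if phrase != '':
-- 		chunk += [(phrase, c[1][2:])]
-- 	return chunk
-- ===== SOURCE B (Python) =====
-- def extract_chunk(senna):
--     raw_chunk = senna['chunk']
--     # pass 1: group tokens into segments, closing at E-/S-/O terminator tags
--     segs, cur = [], []
--     for w, t in raw_chunk:
--         cur.append(w)
--         if 'E-' in t or 'S-' in t or t == 'O':
--             segs.append((cur, t))
--             cur = []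
--     # pass 2: render each segment as (joined phrase, type)
--     single = len(raw_chunk) == 1
--
--     def typ(t):
--         if t == 'O':
--             # a lone 'O'-tagged word with pos 'NN' is taken as NP
--             return 'NP' if single and senna['pos'][0][1] == 'NN' else 'O'
--         return t[2:]
--
--     out = [(' '.join(ws), typ(t)) for ws, t in segs]
--     tail = ' '.join(cur)  # unterminated trailing phrase, if any
--     if tail:
--         out.append((tail, raw_chunk[-1][1][2:]))
--     return out
-- ===== Notes on version B (the rewrite author's own statement) =====
-- stated objective: alternative
-- what changed: A interleaves phrase-building, type decisions and output emission inside one stateful loop; B first groups tokens into segments in one pass and then renders each segment to (joined phrase, type) in a second pass, trading the incremental string/counter state for a segment list.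
-- outside the precondition, e.g. on extract_chunk({'chunk': [('boy', 'O')], 'pos': []}): A raises IndexError, B raises IndexError
import Mathlib
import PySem

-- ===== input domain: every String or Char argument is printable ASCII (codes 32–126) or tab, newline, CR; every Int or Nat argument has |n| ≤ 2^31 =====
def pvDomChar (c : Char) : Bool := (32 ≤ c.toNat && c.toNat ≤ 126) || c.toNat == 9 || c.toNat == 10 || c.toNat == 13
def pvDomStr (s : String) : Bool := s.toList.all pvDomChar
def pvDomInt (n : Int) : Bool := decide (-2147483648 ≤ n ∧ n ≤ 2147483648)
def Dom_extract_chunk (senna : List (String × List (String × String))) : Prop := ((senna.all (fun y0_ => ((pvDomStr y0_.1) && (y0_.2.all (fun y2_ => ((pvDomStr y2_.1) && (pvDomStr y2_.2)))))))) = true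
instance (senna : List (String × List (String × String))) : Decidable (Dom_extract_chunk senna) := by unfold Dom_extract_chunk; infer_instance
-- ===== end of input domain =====

-- B groups tokens into segments in one pass, then renders each segment; A builds phrases and emits pairs inside a single stateful loop.

-- shared helpers: dict lookup (first match) and the senna['pos'][0][1] == 'NN' test
def pvLookup (senna : List (String × List (String × String))) (k : String) : Option (List (String × String)) :=
  (senna.find? (fun p => p.1 == k)).map (·.2)

def pvPosNN (senna : List (String × List (String × String))) : Bool :=
  match pvLookup senna "pos" with
  | some ((_, t) :: _) => t == "NN"
  | _ => false

-- ===== PORT A =====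
-- loop body of A: state = (chunk, phrase, pix, last tag seen); n = len(raw_chunk)
def pvStepA (senna : List (String × List (String × String))) (n : Nat)
    (st : List (String × String) × List Char × Int × String) (c : String × String) :
    List (String × String) × List Char × Int × String :=
  match st with
  | (chunk, phrase, pix, _) =>
    let phrase := if pix > 0 then phrase ++ [' '] else phrase
    let phrase := phrase ++ c.1.toList
    let pix := pix + 1
    let s1 : List (String × String) × List Char × Int :=
      if PySem.Str.isIn "E-" c.2 || PySem.Str.isIn "S-" c.2 then
        (chunk ++ [(String.ofList phrase, PySem.Str.slice c.2 (some 2) none)], [], 0)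
      else (chunk, phrase, pix)
    let s2 : List (String × String) × List Char × Int :=
      if c.2 == "O" then
        ((if n == 1 then
            if pvPosNN senna then s1.1 ++ [(String.ofList s1.2.1, "NP")]
            else s1.1 ++ [(String.ofList s1.2.1, "O")]
          else s1.1 ++ [(String.ofList s1.2.1, "O")]), ([] : List Char), (0 : Int))
      else s1
    (s2.1, s2.2.1, s2.2.2, c.2)

def extract_chunk (senna : List (String × List (String × String))) : List (String × String) :=
  match pvLookup senna "chunk" with
  | none => []  -- Python raises KeyError here; excluded by Pre_
  | some raw_chunk =>
    match raw_chunk.foldl (pvStepA senna raw_chunk.length) ([], [], 0, "") with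
    | (chunk, phrase, _, last) =>
      if phrase ≠ [] then chunk ++ [(String.ofList phrase, PySem.Str.slice last (some 2) none)]
      else chunk

-- ===== PORT B =====
-- pass 1 body of B: state = (segments, current segment's words)
def pvStepB (p : List (List String × String) × List String) (c : String × String) :
    List (List String × String) × List String :=
  let cur := p.2 ++ [c.1]
  if PySem.Str.isIn "E-" c.2 || PySem.Str.isIn "S-" c.2 || c.2 == "O" then
    (p.1 ++ [(cur, c.2)], [])
  else (p.1, cur)

def extract_chunk_alt (senna : List (String × List (String × String))) : List (String × String) :=
  match pvLookup senna "chunk" with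
  | none => []  -- Python raises KeyError here; excluded by Pre_
  | some raw_chunk =>
    match raw_chunk.foldl pvStepB ([], []) with
    | (segs, cur) =>
      let single := raw_chunk.length == 1
      let typ := fun (t : String) =>
        if t == "O" then (if single && pvPosNN senna then "NP" else "O")
        else PySem.Str.slice t (some 2) none
      let out := segs.map (fun s => (PySem.Str.join " " s.1, typ s.2))
      let tail := PySem.Str.join " " cur
      if tail ≠ "" then
        out ++ [(tail, PySem.Str.slice (((PySem.List.pyGet? raw_chunk (-1)).map (·.2)).getD "") (some 2) none)]
      else out

-- ===== PRECONDITION & SPEC =====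
-- needsPos: A reads senna['pos'][0] exactly when the chunk is a single token tagged 'O'
def pvNeedsPos (senna : List (String × List (String × String))) : Bool :=
  match pvLookup senna "chunk" with
  | some [(_, t)] => t == "O"
  | _ => false

-- Pre_ excludes exactly the inputs on which the Python A raises: a senna without a
-- 'chunk' entry (KeyError), and a single-token 'O'-tagged chunk whose 'pos' entry is
-- missing or empty (KeyError/IndexError); B raises on the same inputs.
def Pre_extract_chunk (senna : List (String × List (String × String))) : Prop :=
  ((pvLookup senna "chunk").isSome
    && (!pvNeedsPos senna
        || (match pvLookup senna "pos" with | some (_ :: _) => true | _ => false))) = true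
instance (senna : List (String × List (String × String))) : Decidable (Pre_extract_chunk senna) := by
  unfold Pre_extract_chunk; infer_instance

def pvWitness_extract_chunk : (List (String × List (String × String))) :=
  [("chunk", [("the", "B-NP"), ("lady", "E-NP"), ("smiles", "O")]),
   ("pos", [("the", "DT"), ("lady", "NN"), ("smiles", "VBZ")])]

def Spec_extract_chunk (senna : List (String × List (String × String))) (out : List (String × String)) : Prop := out = extract_chunk_alt senna
instance (senna : List (String × List (String × String))) (out : List (String × String)) : Decidable (Spec_extract_chunk senna out) := by unfold Spec_extract_chunk; infer_instance

-- ===== CLAIM (what is proved, stated in full; the proofs are below) =====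
def Claim_equal_extract_chunk : Prop := ∀ (senna : List (String × List (String × String))), Dom_extract_chunk senna → Pre_extract_chunk senna → Spec_extract_chunk senna (extract_chunk senna)

-- ===== LEMMAS AND PROOFS =====

-- joined phrase of a word list, on the char level
def pvJw (ws : List String) : List Char := PySem.Chars.join [' '] (ws.map String.toList)

-- rendering of one of B's segments, with the 'O'-type precomputed from n = len(raw_chunk)
def pvTO (senna : List (String × List (String × String))) (n : Nat) : String :=
  if n == 1 then (if pvPosNN senna then "NP" else "O") else "O"

def pvRend (senna : List (String × List (String × String))) (n : Nat)
    (s : List String × String) : String × String :=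
  (String.ofList (pvJw s.1),
   if s.2 == "O" then pvTO senna n else PySem.Str.slice s.2 (some 2) none)

lemma pvJw_snoc (ws : List String) (w : String) :
    pvJw (ws ++ [w]) = (if ws = [] then [] else pvJw ws ++ [' ']) ++ w.toList := by
  induction ws with
  | nil => simp [pvJw, PySem.Chars.join_singleton]
  | cons a ws ih =>
    cases ws with
    | nil =>
      show pvJw [a, w] = _
      simp [pvJw, PySem.Chars.join_cons_cons, PySem.Chars.join_singleton]
    | cons b ws' =>
      simp only [List.cons_append, pvJw, List.map_cons, List.map_append, List.map_nil,
        PySem.Chars.join_cons_cons] at *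
      simp [ih]

lemma pv_step_eq (senna : List (String × List (String × String))) (n : Nat)
    (segs : List (List String × String)) (cur : List String) (lt : String)
    (c : String × String) :
    pvStepA senna n (segs.map (pvRend senna n), pvJw cur, (cur.length : Int), lt) c
      = ((pvStepB (segs, cur) c).1.map (pvRend senna n),
         pvJw (pvStepB (segs, cur) c).2,
         ((pvStepB (segs, cur) c).2.length : Int),
         c.2) := by
  have hsnoc := pvJw_snoc cur c.1
  have hjwnil : pvJw [] = [] := rfl
  by_cases hO : c.2 = "O"
  · have hES : (PySem.Str.isIn "E-" c.2 || PySem.Str.isIn "S-" c.2) = false := by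
      rw [hO]; decide
    have hO' : (c.2 == "O") = true := by simp [hO]
    simp only [pvStepA, pvStepB, hES, hO', Bool.false_or, Bool.false_eq_true, if_false, if_true]
    by_cases hc : cur = []
    · subst hc
      simp at hsnoc
      by_cases hn : n = 1 <;> by_cases hp : pvPosNN senna <;>
        simp [pvRend, pvTO, hsnoc, hO', hjwnil, hn, hp]
    · have hlen2 : 0 < cur.length := List.length_pos_iff.mpr hc
      rw [if_neg hc] at hsnoc
      by_cases hn : n = 1 <;> by_cases hp : pvPosNN senna <;>
        simp [pvRend, pvTO, hsnoc, hlen2, hjwnil, hO', hn, hp]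
  · have hO' : (c.2 == "O") = false := by simp [hO]
    by_cases hES : (PySem.Str.isIn "E-" c.2 || PySem.Str.isIn "S-" c.2) = true
    · simp only [pvStepA, pvStepB, hES, hO', Bool.true_or, Bool.false_eq_true,
        if_true, if_false]
      by_cases hc : cur = []
      · subst hc
        simp at hsnoc
        simp [pvRend, hsnoc, hjwnil, hO']
      · have hlen2 : 0 < cur.length := List.length_pos_iff.mpr hc
        rw [if_neg hc] at hsnoc
        simp [pvRend, hsnoc, hlen2, hjwnil, hO']
    · simp only [Bool.not_eq_true] at hES
      simp only [pvStepA, pvStepB, hES, hO', Bool.false_eq_true, Bool.false_or, if_false]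
      by_cases hc : cur = []
      · subst hc
        simp at hsnoc
        simp [hsnoc, hjwnil]
      · have hlen2 : 0 < cur.length := List.length_pos_iff.mpr hc
        rw [if_neg hc] at hsnoc
        simp [hsnoc, hlen2]

lemma pv_loop_eq (senna : List (String × List (String × String))) (n : Nat) :
    ∀ (l : List (String × String)) (segs : List (List String × String))
      (cur : List String) (lt : String),
    l.foldl (pvStepA senna n) (segs.map (pvRend senna n), pvJw cur, (cur.length : Int), lt)
      = ((l.foldl pvStepB (segs, cur)).1.map (pvRend senna n),
         pvJw (l.foldl pvStepB (segs, cur)).2,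
         ((l.foldl pvStepB (segs, cur)).2.length : Int),
         l.foldl (fun _ c => c.2) lt) := by
  intro l
  induction l with
  | nil => intro segs cur lt; rfl
  | cons c l ih =>
    intro segs cur lt
    have hstep := pv_step_eq senna n segs cur lt c
    simp only [List.foldl_cons, hstep]
    rcases hB : pvStepB (segs, cur) c with ⟨segs', cur'⟩
    simpa [hB] using ih segs' cur' c.2

lemma pv_last_eq : ∀ (l : List (String × String)) (lt : String), l ≠ [] →
    l.foldl (fun _ c => c.2) lt = (((PySem.List.pyGet? l (-1)).map (·.2)).getD "") := by
  intro l
  induction l with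
  | nil => intro lt h; exact absurd rfl h
  | cons c l ih =>
    intro lt _
    cases hl : l with
    | nil => simp [PySem.List.pyGet?, PySem.List.pyIdx?]
    | cons d l' =>
      have h1 : (c :: d :: l').foldl (fun _ c => c.2) lt = (d :: l').foldl (fun _ c => c.2) c.2 := rfl
      rw [hl] at ih
      rw [h1, ih c.2 (by simp)]
      have h2 : PySem.List.pyGet? (c :: d :: l') (-1) = PySem.List.pyGet? (d :: l') (-1) := by
        simp [PySem.List.pyGet?, PySem.List.pyIdx?]; rfl
      rw [h2]

lemma pv_ofList_ne_empty (l : List Char) : (String.ofList l ≠ "") = (l ≠ []) := by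
  simp only [eq_iff_iff]
  constructor
  · intro h hl
    subst hl
    exact h rfl
  · intro h hs
    apply h
    have := congrArg String.toList hs
    simpa using this

-- ===== VERDICT (by name: the statement is the Claim_ definition above) =====
theorem extract_chunk_spec : Claim_equal_extract_chunk := by
  intro senna _ _
  unfold Spec_extract_chunk extract_chunk extract_chunk_alt
  cases hch : pvLookup senna "chunk" with
  | none => rfl
  | some raw =>
    dsimp only
    have hloop := pv_loop_eq senna raw.length raw [] [] ""
    simp only [List.map_nil] at hloop
    have hjw : pvJw [] = [] := by simp [pvJw, PySem.Chars.join_nil]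
    rw [hjw] at hloop
    simp only [List.length_nil, Nat.cast_zero] at hloop
    rw [hloop]
    rcases hB : raw.foldl pvStepB ([], []) with ⟨segs, cur⟩
    dsimp only
    -- B's rendered segments equal pvRend of the segments
    have hmap : segs.map (fun s => (PySem.Str.join " " s.1,
        if s.2 == "O" then (if (raw.length == 1) && pvPosNN senna then "NP" else "O")
        else PySem.Str.slice s.2 (some 2) none)) = segs.map (pvRend senna raw.length) := by
      apply List.map_congr_left
      intro s _
      simp only [pvRend, pvTO, Prod.mk.injEq]
      refine ⟨rfl, ?_⟩
      cases h1 : (raw.length == 1) <;> cases h2 : pvPosNN senna <;> simp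
    have htail : PySem.Str.join " " cur = String.ofList (pvJw cur) := rfl
    by_cases hc : pvJw cur = []
    · rw [if_neg (by simp [hc]), if_neg (by rw [htail, pv_ofList_ne_empty]; simp [hc])]
      exact hmap.symm
    · rw [if_pos (by simp [hc]), if_pos (by rw [htail, pv_ofList_ne_empty]; exact hc)]
      have hraw : raw ≠ [] := by
        intro h; rw [h] at hB
        simp only [List.foldl_nil] at hB
        cases hB; exact hc rfl
      rw [hmap, htail, pv_last_eq raw "" hraw]
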